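-- pv_equiv track=rewrite | github.com/nicholaschen2003/triviaBot | discord_bot.py | split_song_difficulty
-- ===== SOURCE A (Python) =====
-- def split_song_difficulty(song_list):
--     easy = []
--     medium = []
--     hard = []
--     impossible = []
--     for song in song_list:
--         if song[0][0] == "1":
--             easy.append(song)
--         elif song[0][0] == "2":
--             medium.append(song)
--         elif song[0][0] == "3":
--             hard.append(song)
--         else:
--             impossible.append(song)
--     return easy, medium, hard, impossible
-- ===== SOURCE B (Python) =====
-- def split_song_difficulty(song_list):
--     easy = [s for s in song_list if s[0][0] == "1"]
--     medium = [s for s in song_list if s[0][0] == "2"]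
--     hard = [s for s in song_list if s[0][0] == "3"]
--     impossible = [s for s in song_list if s[0][0] not in ("1", "2", "3")]
--     return easy, medium, hard, impossible
-- ===== Notes on version B (the rewrite author's own statement) =====
-- stated objective: simpler
-- what changed: Replaces the single accumulating loop with an if/elif chain by four independent filtering comprehensions over song_list, one per bucket.
import Mathlib
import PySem

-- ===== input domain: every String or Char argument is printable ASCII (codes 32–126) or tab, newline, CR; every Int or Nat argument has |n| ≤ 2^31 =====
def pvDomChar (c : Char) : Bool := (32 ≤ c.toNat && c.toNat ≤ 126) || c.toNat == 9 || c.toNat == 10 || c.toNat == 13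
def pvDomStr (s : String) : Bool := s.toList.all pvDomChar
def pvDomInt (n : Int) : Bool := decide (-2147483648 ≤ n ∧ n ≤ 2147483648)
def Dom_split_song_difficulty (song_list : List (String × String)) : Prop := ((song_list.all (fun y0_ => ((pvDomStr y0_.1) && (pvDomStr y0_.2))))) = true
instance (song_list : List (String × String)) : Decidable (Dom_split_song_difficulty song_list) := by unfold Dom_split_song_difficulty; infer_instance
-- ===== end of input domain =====

-- B replaces A's single accumulating loop by four independent filtering passes (simpler decomposition, same cost).

-- ===== PORT A =====
-- song[0][0]: Python raises IndexError when song[0] is empty; PySem.Str.pyGet? returns none there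
-- (Pre_ excludes such inputs; the none branch is unreachable under Pre_).
def split_song_difficulty (song_list : List (String × String)) : (List (String × String)) × (List (String × String)) × (List (String × String)) × (List (String × String)) :=
  song_list.foldl (fun st song =>
    match st with
    | (easy, medium, hard, impossible) =>
      if PySem.Str.pyGet? song.1 0 = some '1' then (easy ++ [song], medium, hard, impossible)
      else if PySem.Str.pyGet? song.1 0 = some '2' then (easy, medium ++ [song], hard, impossible)
      else if PySem.Str.pyGet? song.1 0 = some '3' then (easy, medium, hard ++ [song], impossible)
      else (easy, medium, hard, impossible ++ [song])) ([], [], [], [])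

-- ===== PORT B =====
def split_song_difficulty_alt (song_list : List (String × String)) : (List (String × String)) × (List (String × String)) × (List (String × String)) × (List (String × String)) :=
  (song_list.filter (fun s => PySem.Str.pyGet? s.1 0 = some '1'),
   song_list.filter (fun s => PySem.Str.pyGet? s.1 0 = some '2'),
   song_list.filter (fun s => PySem.Str.pyGet? s.1 0 = some '3'),
   song_list.filter (fun s => ¬ (PySem.Str.pyGet? s.1 0 = some '1' ∨ PySem.Str.pyGet? s.1 0 = some '2' ∨ PySem.Str.pyGet? s.1 0 = some '3')))

-- ===== PRECONDITION & SPEC =====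
-- Pre_ excludes songs whose first component is the empty string: there both A and B raise IndexError on song[0][0].
def Pre_split_song_difficulty (song_list : List (String × String)) : Prop :=
  ∀ s ∈ song_list, s.1 ≠ ""
instance (song_list : List (String × String)) : Decidable (Pre_split_song_difficulty song_list) := by unfold Pre_split_song_difficulty; infer_instance
def pvWitness_split_song_difficulty : (List (String × String)) := [("1 Easy Song", "artist"), ("2 Med", "x"), ("zzz", "y")]

def Spec_split_song_difficulty (song_list : List (String × String)) (out : (List (String × String)) × (List (String × String)) × (List (String × String)) × (List (String × String))) : Prop := out = split_song_difficulty_alt song_list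
instance (song_list : List (String × String)) (out : (List (String × String)) × (List (String × String)) × (List (String × String)) × (List (String × String))) : Decidable (Spec_split_song_difficulty song_list out) := by unfold Spec_split_song_difficulty; infer_instance

-- ===== CLAIM =====
def Claim_equal_split_song_difficulty : Prop := ∀ (song_list : List (String × String)), Dom_split_song_difficulty song_list → Pre_split_song_difficulty song_list → Spec_split_song_difficulty song_list (split_song_difficulty song_list)

-- ===== LEMMAS AND PROOFS =====

-- Loop invariant: A's fold from accumulators (e, m, h, i) appends B's four filters.
theorem split_fold_eq (song_list : List (String × String))
    (e m h i : List (String × String)) :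
    song_list.foldl (fun st song =>
      match st with
      | (easy, medium, hard, impossible) =>
        if PySem.Str.pyGet? song.1 0 = some '1' then (easy ++ [song], medium, hard, impossible)
        else if PySem.Str.pyGet? song.1 0 = some '2' then (easy, medium ++ [song], hard, impossible)
        else if PySem.Str.pyGet? song.1 0 = some '3' then (easy, medium, hard ++ [song], impossible)
        else (easy, medium, hard, impossible ++ [song])) (e, m, h, i)
    = (e ++ song_list.filter (fun s => PySem.Str.pyGet? s.1 0 = some '1'),
       m ++ song_list.filter (fun s => PySem.Str.pyGet? s.1 0 = some '2'),
       h ++ song_list.filter (fun s => PySem.Str.pyGet? s.1 0 = some '3'),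
       i ++ song_list.filter (fun s => ¬ (PySem.Str.pyGet? s.1 0 = some '1' ∨ PySem.Str.pyGet? s.1 0 = some '2' ∨ PySem.Str.pyGet? s.1 0 = some '3'))) := by
  induction song_list generalizing e m h i with
  | nil => simp
  | cons x xs ih =>
    simp only [List.foldl_cons]
    by_cases h1 : PySem.List.pyGet? x.1.toList 0 = some '1'
    · rw [if_pos (by simpa using h1), ih]
      simp [h1]
    · by_cases h2 : PySem.List.pyGet? x.1.toList 0 = some '2'
      · rw [if_neg (by simpa using h1), if_pos (by simpa using h2), ih]
        simp [h2]
      · by_cases h3 : PySem.List.pyGet? x.1.toList 0 = some '3'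
        · rw [if_neg (by simpa using h1), if_neg (by simpa using h2), if_pos (by simpa using h3), ih]
          simp [h3]
        · rw [if_neg (by simpa using h1), if_neg (by simpa using h2), if_neg (by simpa using h3), ih]
          simp [h1, h2, h3]

-- ===== VERDICT =====
theorem split_song_difficulty_spec : Claim_equal_split_song_difficulty := by
  intro song_list _ _
  unfold Spec_split_song_difficulty split_song_difficulty split_song_difficulty_alt
  simpa using split_fold_eq song_list [] [] [] []
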